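-- pv_equiv track=rewrite | github.com/arazazi/DeepRead | deepreadV4.py | decode_xxencode
-- ===== SOURCE A (Python) =====
-- def decode_xxencode(text: str) -> str:
--     lines = text.strip().split('\n')
--     if not lines or not lines[0].startswith('begin') or not lines[-1] == 'end':
--         return "Invalid XXencode format."
--
--     decoded_data_parts = []
--     for line in lines[1:-1]:
--         if not line:
--             continue
--
--         try:
--             length_char = line[0]
--             num_bytes_encoded = ord(length_char) - 32
--
--             encoded_chunk_chars = line[1:]
--
--             decoded_bytes_chunk = bytearray()
--             for i in range(0, len(encoded_chunk_chars), 4):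
--                 chars_raw = encoded_chunk_chars[i:i+4]
--                 if len(chars_raw) < 2: continue
--
--                 chars_values = [(ord(c) - 32) & 0x3f for c in chars_raw]
--
--                 if len(chars_values) >= 2:
--                     decoded_bytes_chunk.append((chars_values[0] << 2) | ((chars_values[1] & 0x30) >> 4))
--                 if len(chars_values) >= 3:
--                     decoded_bytes_chunk.append(((chars_values[1] & 0x0f) << 4) | ((chars_values[2] & 0x3c) >> 2))
--                 if len(chars_values) >= 4:
--                     decoded_bytes_chunk.append(((chars_values[2] & 0x03) << 6) | chars_values[3])
--
--             decoded_data_parts.append(bytes(decoded_bytes_chunk[:num_bytes_encoded]).decode('utf-8', errors='ignore'))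
--         except (ValueError, IndexError) as e:
--             return f"Error during XXencode decoding: {e}"
--
--     return ''.join(decoded_data_parts)
-- ===== SOURCE B (Python) =====
-- def decode_xxencode(text: str) -> str:
--     lines = text.strip().split('\n')
--     if not lines or not lines[0].startswith('begin') or not lines[-1] == 'end':
--         return "Invalid XXencode format."
--
--     parts = []
--     for line in lines[1:-1]:
--         if not line:
--             continue
--         num_bytes_encoded = ord(line[0]) - 32
--         buf = bytearray()
--         acc = 0
--         bits = 0
--         for c in line[1:]:
--             acc = (acc << 6) | ((ord(c) - 32) & 0x3f)
--             bits += 6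
--             if bits >= 8:
--                 bits -= 8
--                 buf.append((acc >> bits) & 0xff)
--                 acc &= (1 << bits) - 1
--         parts.append(bytes(buf[:num_bytes_encoded]).decode('utf-8', errors='ignore'))
--     return ''.join(parts)
-- ===== Notes on version B (the rewrite author's own statement) =====
-- stated objective: alternative
-- what changed: A decodes each line by slicing the payload into 4-character windows and applying three explicit per-window byte formulas; B streams the payload character by character through an MSB-first integer bit buffer with a bit count, emitting a byte whenever 8 bits accumulate.
import Mathlib
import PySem

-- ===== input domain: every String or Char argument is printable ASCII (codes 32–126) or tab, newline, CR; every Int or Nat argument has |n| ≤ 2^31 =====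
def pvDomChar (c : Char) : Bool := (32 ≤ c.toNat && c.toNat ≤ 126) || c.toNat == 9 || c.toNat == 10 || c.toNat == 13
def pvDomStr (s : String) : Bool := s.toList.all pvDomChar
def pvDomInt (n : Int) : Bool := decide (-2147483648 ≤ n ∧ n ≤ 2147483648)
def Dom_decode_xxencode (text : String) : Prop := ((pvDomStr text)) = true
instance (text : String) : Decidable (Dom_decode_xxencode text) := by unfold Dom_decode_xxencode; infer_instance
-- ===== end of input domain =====

-- B replaces A's per-4-char-window byte formulas by a 6-bit-at-a-time bit buffer (alternative decomposition, same cost).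
-- Shared helpers of both ports (ports of the same Python expressions/stdlib calls both sources make):

-- (ord(c) - 32) & 0x3f : Python's & on a possibly negative int is two's-complement, exactly Int.land
def xxVal (c : Char) : Nat := (Int.land ((c.toNat : Int) - 32) 63).toNat

-- port of bytes(·).decode('utf-8', errors='ignore') : CPython's UTF-8 decoder with invalid
-- maximal subparts skipped; every emitted code is a valid scalar, so Char.ofNat is exact chr
def utf8DecodeIgnore : List Nat → List Char
  | [] => []
  | b :: rest =>
    if b < 128 then Char.ofNat b :: utf8DecodeIgnore rest
    else if 194 ≤ b ∧ b ≤ 223 then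
      match rest with
      | [] => []
      | b1 :: rest1 =>
        if 128 ≤ b1 ∧ b1 ≤ 191 then
          Char.ofNat ((b - 192) * 64 + (b1 - 128)) :: utf8DecodeIgnore rest1
        else utf8DecodeIgnore (b1 :: rest1)
    else if 224 ≤ b ∧ b ≤ 239 then
      match rest with
      | [] => []
      | b1 :: rest1 =>
        if (if b = 224 then 160 else 128) ≤ b1 ∧ b1 ≤ (if b = 237 then 159 else 191) then
          match rest1 with
          | [] => []
          | b2 :: rest2 =>
            if 128 ≤ b2 ∧ b2 ≤ 191 then
              Char.ofNat ((b - 224) * 4096 + (b1 - 128) * 64 + (b2 - 128)) :: utf8DecodeIgnore rest2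
            else utf8DecodeIgnore (b2 :: rest2)
        else utf8DecodeIgnore (b1 :: rest1)
    else if 240 ≤ b ∧ b ≤ 244 then
      match rest with
      | [] => []
      | b1 :: rest1 =>
        if (if b = 240 then 144 else 128) ≤ b1 ∧ b1 ≤ (if b = 244 then 143 else 191) then
          match rest1 with
          | [] => []
          | b2 :: rest2 =>
            if 128 ≤ b2 ∧ b2 ≤ 191 then
              match rest2 with
              | [] => []
              | b3 :: rest3 =>
                if 128 ≤ b3 ∧ b3 ≤ 191 then
                  Char.ofNat ((b - 240) * 262144 + (b1 - 128) * 4096 + (b2 - 128) * 64 + (b3 - 128)) :: utf8DecodeIgnore rest3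
                else utf8DecodeIgnore (b3 :: rest3)
            else utf8DecodeIgnore (b2 :: rest2)
        else utf8DecodeIgnore (b1 :: rest1)
    else utf8DecodeIgnore rest

-- ===== PORT A =====
-- A's inner loop `for i in range(0, len, 4)` over 4-char windows with the three explicit byte formulas
def pvAChunks : List Char → List Nat
  | [] => []
  | [_] => []                                -- window of length 1: `if len(chars_raw) < 2: continue`
  | [c0, c1] =>
    [(xxVal c0 <<< 2) ||| ((xxVal c1 &&& 48) >>> 4)]
  | [c0, c1, c2] =>
    [(xxVal c0 <<< 2) ||| ((xxVal c1 &&& 48) >>> 4),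
     ((xxVal c1 &&& 15) <<< 4) ||| ((xxVal c2 &&& 60) >>> 2)]
  | c0 :: c1 :: c2 :: c3 :: rest =>
    ((xxVal c0 <<< 2) ||| ((xxVal c1 &&& 48) >>> 4)) ::
    (((xxVal c1 &&& 15) <<< 4) ||| ((xxVal c2 &&& 60) >>> 2)) ::
    (((xxVal c2 &&& 3) <<< 6) ||| xxVal c3) :: pvAChunks rest

-- A's per-line body (line is nonempty at every call site; the try/except can never fire:
-- ord never raises and all indexing is guarded, so it is ported as straight-line code)
def pvALine (line : List Char) : List Char :=
  match line with
  | [] => []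
  | c0 :: restChars =>
    let numBytes : Int := (c0.toNat : Int) - 32
    utf8DecodeIgnore (PySem.List.slice (pvAChunks restChars) none (some numBytes))

def decode_xxencode (text : String) : String :=
  let lines := PySem.Chars.splitOn (PySem.Chars.strip text.toList) ['\n']
  if lines.isEmpty ∨ PySem.Chars.startswith (lines.headD []) ['b','e','g','i','n'] = false
      ∨ lines.getLastD [] ≠ ['e','n','d'] then
    "Invalid XXencode format."
  else
    let parts := (PySem.List.slice lines (some 1) (some (-1))).foldl
      (fun parts line => if line = [] then parts else parts ++ [pvALine line])
      ([] : List (List Char))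
    String.ofList (PySem.Chars.join [] parts)

-- ===== PORT B =====
-- B's inner loop: an MSB-first bit buffer `acc` holding `bits` bits, emitting a byte whenever ≥ 8
def pvBLoop : List Char → List Nat → Nat → Nat → List Nat
  | [], buf, _, _ => buf
  | c :: rest, buf, acc, bits =>
    let acc' := (acc <<< 6) ||| xxVal c
    let bits' := bits + 6
    if 8 ≤ bits' then
      pvBLoop rest (buf ++ [(acc' >>> (bits' - 8)) &&& 255]) (acc' &&& ((1 <<< (bits' - 8)) - 1)) (bits' - 8)
    else
      pvBLoop rest buf acc' bits'

def pvBLine (line : List Char) : List Char :=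
  match line with
  | [] => []
  | c0 :: restChars =>
    let numBytes : Int := (c0.toNat : Int) - 32
    utf8DecodeIgnore (PySem.List.slice (pvBLoop restChars [] 0 0) none (some numBytes))

def decode_xxencode_alt (text : String) : String :=
  let lines := PySem.Chars.splitOn (PySem.Chars.strip text.toList) ['\n']
  if lines.isEmpty ∨ PySem.Chars.startswith (lines.headD []) ['b','e','g','i','n'] = false
      ∨ lines.getLastD [] ≠ ['e','n','d'] then
    "Invalid XXencode format."
  else
    let parts := (PySem.List.slice lines (some 1) (some (-1))).foldl
      (fun parts line => if line = [] then parts else parts ++ [pvBLine line])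
      ([] : List (List Char))
    String.ofList (PySem.Chars.join [] parts)

-- ===== PRECONDITION & SPEC =====
def Spec_decode_xxencode (text : String) (out : String) : Prop := out = decode_xxencode_alt text
instance (text : String) (out : String) : Decidable (Spec_decode_xxencode text out) := by unfold Spec_decode_xxencode; infer_instance

-- ===== CLAIM (what is proved, stated in full; the proofs are below) =====
def Claim_equal_decode_xxencode : Prop := ∀ (text : String), Dom_decode_xxencode text → Spec_decode_xxencode text (decode_xxencode text)

-- ===== LEMMAS AND PROOFS =====

lemma xxVal_lt (c : Char) : xxVal c < 64 := by
  unfold xxVal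
  cases h : (c.toNat : Int) - 32 with
  | ofNat m =>
    simp only [Int.land]
    have := Nat.and_le_right (n := m) (m := 63)
    omega
  | negSucc m =>
    simp only [Int.land]
    have : Nat.ldiff 63 m < 2 ^ 6 := by
      apply Nat.lt_pow_two_of_testBit
      intro i hi
      rw [Nat.testBit_ldiff]
      have h63 : Nat.testBit 63 i = false := Nat.testBit_lt_two_pow (by
        calc (63 : Nat) < 2 ^ 6 := by norm_num
          _ ≤ 2 ^ i := Nat.pow_le_pow_right (by norm_num) hi)
      simp [h63]
    simpa using this

lemma d1 : ∀ v0 : Nat, v0 < 64 → ∀ v1 : Nat, v1 < 64 →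
    (((v0 <<< 6) ||| v1) >>> 4) &&& 255 = (v0 <<< 2) ||| ((v1 &&& 48) >>> 4)
    ∧ ((v0 <<< 6) ||| v1) &&& 15 = v1 &&& 15 := by decide

lemma d2 : ∀ v1 : Nat, v1 < 64 → ∀ v2 : Nat, v2 < 64 →
    ((((v1 &&& 15) <<< 6) ||| v2) >>> 2) &&& 255 = ((v1 &&& 15) <<< 4) ||| ((v2 &&& 60) >>> 2)
    ∧ (((v1 &&& 15) <<< 6) ||| v2) &&& 3 = v2 &&& 3 := by decide

lemma d3 : ∀ v2 : Nat, v2 < 64 → ∀ v3 : Nat, v3 < 64 →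
    (((v2 &&& 3) <<< 6) ||| v3) &&& 255 = ((v2 &&& 3) <<< 6) ||| v3 := by decide

lemma e1 (c0 c1 : Char) :
    (((xxVal c0 <<< 6) ||| xxVal c1) >>> 4) &&& 255 = (xxVal c0 <<< 2) ||| ((xxVal c1 &&& 48) >>> 4) :=
  (d1 _ (xxVal_lt c0) _ (xxVal_lt c1)).1

lemma e1m (c0 c1 : Char) :
    ((xxVal c0 <<< 6) ||| xxVal c1) &&& 15 = xxVal c1 &&& 15 :=
  (d1 _ (xxVal_lt c0) _ (xxVal_lt c1)).2

lemma e2 (c1 c2 : Char) :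
    ((((xxVal c1 &&& 15) <<< 6) ||| xxVal c2) >>> 2) &&& 255
      = ((xxVal c1 &&& 15) <<< 4) ||| ((xxVal c2 &&& 60) >>> 2) :=
  (d2 _ (xxVal_lt c1) _ (xxVal_lt c2)).1

lemma e2m (c1 c2 : Char) :
    (((xxVal c1 &&& 15) <<< 6) ||| xxVal c2) &&& 3 = xxVal c2 &&& 3 :=
  (d2 _ (xxVal_lt c1) _ (xxVal_lt c2)).2

lemma e3 (c2 c3 : Char) :
    (((xxVal c2 &&& 3) <<< 6) ||| xxVal c3) &&& 255 = ((xxVal c2 &&& 3) <<< 6) ||| xxVal c3 :=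
  d3 _ (xxVal_lt c2) _ (xxVal_lt c3)

lemma pvBLoop_eq_chunks : ∀ (cs : List Char) (buf : List Nat), pvBLoop cs buf 0 0 = buf ++ pvAChunks cs := by
  intro cs
  induction cs using pvAChunks.induct with
  | case1 => intro buf; simp [pvBLoop, pvAChunks]
  | case2 c => intro buf; simp [pvBLoop, pvAChunks]
  | case3 c0 c1 => intro buf; simp [pvBLoop, pvAChunks, e1]
  | case4 c0 c1 c2 => intro buf; simp [pvBLoop, pvAChunks, e1, e1m, e2]
  | case5 c0 c1 c2 c3 rest ih =>
    intro buf
    simp only [pvBLoop, pvAChunks]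
    simp [e1, e1m, e2, e2m, e3, ih]

lemma pvBLine_eq_pvALine : pvBLine = pvALine := by
  funext line
  cases line with
  | nil => rfl
  | cons c0 restChars => simp [pvBLine, pvALine, pvBLoop_eq_chunks]

-- ===== VERDICT (by name: the statement is the Claim_ definition above) =====
theorem decode_xxencode_spec : Claim_equal_decode_xxencode := by
  intro text _
  show decode_xxencode text = decode_xxencode_alt text
  unfold decode_xxencode decode_xxencode_alt
  rw [pvBLine_eq_pvALine]
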